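-- pv_equiv track=rewrite | github.com/sdh98429/dj2_alg_study | PROGRAMMERS/level2/다음_큰_숫자.py | solution
-- ===== SOURCE A (Python) =====
-- def solution(n):
--     binary = '0' + bin(n)[2:] # 이진수 변환
--     one = 0 # 옮길 1의 위치
--     isOne = False # 지금까지 1을 만났었는지
--     move = False # 자리변경을 했는지
--     answer = 0
--     for i in range(len(binary)-1, -1, -1): # 오른쪽에서 찾아가기
--         if binary[i] == '1': # 1인 경우
--             isOne = True # 1을 만났다고 처리하기
--             if move: # 만약 자리변경했다면
--                 answer += 2 ** (len(binary) - 1 - i) # 그냥 자리수에 맞게 바로 더해주기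
--             else: # 자리변경안했다면
--                 one += 1 # 지금까지 만난 1의 수 더하기
--         else: # 0인 경우
--             if isOne and not move: # 1을 만났고 자리변경안했다면 자리변경하기
--                 move = True # 자리변경 확인
--                 answer += 2 ** (len(binary) - 1 - i) # 0을 1로 바꾸기
--                 answer += 2 ** (one-1) -1 # 지금까지 만난 1 전부 오른쪽에 몰기
--     return answer
-- ===== SOURCE B (Python) =====
-- def solution(n):
--     # Gosper's hack: smallest integer above n with the same popcount, O(1) bit tricks.
--     c = n & -n            # lowest set bit
--     r = n + c             # ripple the carry into the next 0
--     return (((r ^ n) >> 2) // c) | r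
-- ===== Notes on version B (the rewrite author's own statement) =====
-- stated objective: faster
-- what changed: Replaces A's binary-string construction and right-to-left per-character scanning loop (with one/isOne/move flag state) by Gosper's hack: three branch-free bit-arithmetic operations (c = n & -n, r = n + c, (((r ^ n) >> 2) // c) | r) computing the next larger integer with the same popcount in closed form.
-- outside the precondition, e.g. on solution(0): A returns 0, B raises ZeroDivisionError; on solution(-5): A returns 6, B returns -3
import Mathlib
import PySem

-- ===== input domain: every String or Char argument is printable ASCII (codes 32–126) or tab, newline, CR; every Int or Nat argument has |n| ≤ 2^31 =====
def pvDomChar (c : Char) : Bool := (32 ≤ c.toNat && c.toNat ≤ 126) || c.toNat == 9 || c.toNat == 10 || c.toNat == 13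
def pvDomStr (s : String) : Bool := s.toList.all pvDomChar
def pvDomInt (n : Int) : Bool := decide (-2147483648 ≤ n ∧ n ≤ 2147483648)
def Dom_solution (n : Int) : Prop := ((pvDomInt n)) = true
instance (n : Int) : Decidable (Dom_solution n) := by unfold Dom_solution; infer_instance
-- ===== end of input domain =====

-- B replaces A's binary-string scan by Gosper's-hack bit arithmetic (closed form, no loop).

-- ===== PORT A =====
-- A's loop body, one iteration of `for i in range(len(binary)-1, -1, -1)`;
-- state = (one, isOne, move, answer).  The `.toNat` on both exponents is exact
-- wherever Python evaluates them: i ≤ len-1 gives len-1-i ≥ 0, and `one ≥ 1`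
-- whenever the move branch fires (move requires isOne, which requires a '1').
def solutionStep (binary : List Char) (L : Int) (st : Int × Bool × Bool × Int) (i : Int) :
    Int × Bool × Bool × Int :=
  match st with
  | (one, isOne, move, answer) =>
    if PySem.List.pyGetD binary i ' ' = '1' then
      if move then (one, true, move, answer + 2 ^ (L - 1 - i).toNat)
      else (one + 1, true, move, answer)
    else
      if isOne && !move then
        (one, isOne, true, answer + 2 ^ (L - 1 - i).toNat + (2 ^ (one - 1).toNat - 1))
      else (one, isOne, move, answer)

def solution (n : Int) : Int :=
  let binary : List Char := '0' :: PySem.List.slice (PySem.Int.toBinChars0b n) (some 2)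
  let L : Int := PySem.List.len binary
  ((PySem.List.pyRange (L - 1) (-1) (-1)).foldl (solutionStep binary L)
    (0, false, false, 0)).2.2.2

-- ===== PORT B =====
def solution_alt (n : Int) : Int :=
  let c := PySem.Int.band n (-n)
  let r := n + c
  PySem.Int.bor (PySem.Int.floordiv ((PySem.Int.bxor r n) >>> (2:Nat)) c) r

-- ===== PRECONDITION & SPEC =====
-- Pre_ restricts to the task's natural domain (Programmers: n is a positive integer):
-- at n = 0 B raises ZeroDivisionError (c = 0) where A returns 0, and for n < 0 A's
-- value is an artefact of the stray 'b' character bin(n)[2:] leaves in its digit string.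
def Pre_solution (n : Int) : Prop := 1 ≤ n
instance (n : Int) : Decidable (Pre_solution n) := by unfold Pre_solution; infer_instance
def pvWitness_solution : Int := (78)
def Spec_solution (n : Int) (out : Int) : Prop := out = solution_alt n
instance (n : Int) (out : Int) : Decidable (Spec_solution n out) := by unfold Spec_solution; infer_instance

-- ===== CLAIM (what is proved, stated in full; the proofs are below) =====
def Claim_equal_solution : Prop := ∀ (n : Int), Dom_solution n → Pre_solution n → Spec_solution n (solution n)

-- ===== LEMMAS AND PROOFS =====

-- ---- bit-doubling laws for Nat's bitwise operators ----
theorem pv_xor_bit (a b : Nat) (x y : Bool) :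
    (2*a + x.toNat) ^^^ (2*b + y.toNat) = 2*(a ^^^ b) + (Bool.xor x y).toNat := by
  have h := Nat.bitwise_bit (f := Bool.xor) (a := x) (m := a) (b := y) (n := b)
  have e : ∀ u v : Nat, Nat.bitwise Bool.xor u v = u ^^^ v := fun _ _ => rfl
  rw [e, e] at h
  cases x <;> cases y <;> simpa [Nat.bit] using h

theorem pv_land_bit (a b : Nat) (x y : Bool) :
    (2*a + x.toNat) &&& (2*b + y.toNat) = 2*(a &&& b) + (x && y).toNat := by
  have h := Nat.bitwise_bit (f := Bool.and) (a := x) (m := a) (b := y) (n := b)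
  have e : ∀ u v : Nat, Nat.bitwise Bool.and u v = u &&& v := fun _ _ => rfl
  rw [e, e] at h
  cases x <;> cases y <;> simpa [Nat.bit] using h

theorem pv_lor_bit (a b : Nat) (x y : Bool) :
    (2*a + x.toNat) ||| (2*b + y.toNat) = 2*(a ||| b) + (x || y).toNat := by
  have h := Nat.bitwise_bit (f := Bool.or) (a := x) (m := a) (b := y) (n := b)
  have e : ∀ u v : Nat, Nat.bitwise Bool.or u v = u ||| v := fun _ _ => rfl
  rw [e, e] at h
  cases x <;> cases y <;> simpa [Nat.bit] using h

-- m &&& (m-1) clears the lowest set bit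
theorem pv_land_pred (z : Nat) : ∀ u : Nat, u % 2 = 1 →
    (u * 2^z) &&& (u * 2^z - 1) = u * 2^z - 2^z := by
  induction z with
  | zero =>
    intro u hu
    obtain ⟨v, rfl⟩ : ∃ v, u = 2*v + 1 := ⟨u / 2, by omega⟩
    have h := pv_land_bit v v true false
    simp only [Bool.toNat_true, Bool.toNat_false, Bool.and_false] at h
    have e2 : (2*v+1) * 2^0 - 1 = 2*v + 0 := by simp
    have e1 : (2*v+1) * 2^0 = 2*v + 1 := by simp
    rw [e2, e1, h, Nat.and_self]
    simp
  | succ z ih =>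
    intro u hu
    have hu1 : 1 ≤ u := by omega
    have ht : (0:Nat) < 2^z := Nat.two_pow_pos z
    have h1 : 1 ≤ u * 2^z := Nat.one_le_iff_ne_zero.2 (by positivity)
    have e2 : u * 2^(z+1) - 1 = 2 * (u * 2^z - 1) + Bool.toNat true := by
      simp only [Bool.toNat_true, pow_succ]
      have : u * (2^z * 2) = (u * 2^z) * 2 := by ring
      omega
    have e1 : u * 2^(z+1) = 2 * (u * 2^z) + Bool.toNat false := by
      simp only [Bool.toNat_false, add_zero, pow_succ]; ring
    rw [e2, e1, pv_land_bit, ih u hu]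
    have h2 : u * 2^(z+1) = 2 * (u * 2^z) := by rw [pow_succ]; ring
    simp only [Bool.false_and, Bool.toNat_false, add_zero, pow_succ]
    omega

theorem pv_xor_odd (q : Nat) : ∀ o : Nat, 1 ≤ o →
    ((2*q+1) * 2^o) ^^^ (2*q*2^o + (2^o - 1)) = 2^(o+1) - 1 := by
  intro o ho
  induction o, ho using Nat.le_induction with
  | base =>
    have e1 : (2*q+1) * 2^1 = 2 * (2*q+1) + Bool.toNat false := by
      simp only [Bool.toNat_false, add_zero]; ring
    have e2 : 2*q*2^1 + (2^1 - 1) = 2 * (2*q) + Bool.toNat true := by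
      simp only [Bool.toNat_true]; ring
    have hx : (2*q+1) ^^^ (2*q) = 1 := by
      have h := pv_xor_bit q q true false
      simpa [Nat.xor_self] using h
    rw [e1, e2, pv_xor_bit, hx]
    simp
  | succ o ho ih =>
    have hp : (0:Nat) < 2^o := Nat.two_pow_pos o
    have e1 : (2*q+1) * 2^(o+1) = 2 * ((2*q+1) * 2^o) + Bool.toNat false := by
      simp only [Bool.toNat_false, add_zero, pow_succ]; ring
    have e2 : 2*q*2^(o+1) + (2^(o+1) - 1) = 2 * (2*q*2^o + (2^o - 1)) + Bool.toNat true := by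
      simp only [Bool.toNat_true, pow_succ]
      have : 2*q*(2^o*2) = (2*q*2^o)*2 := by ring
      omega
    rw [e1, e2, pv_xor_bit, ih]
    have hp1 : (0:Nat) < 2^(o+1) := Nat.two_pow_pos (o+1)
    have h3 : (2:Nat)^(o+1+1) = 2^(o+1) * 2 := by rw [pow_succ]
    have h4 : (Bool.xor false true).toNat = 1 := rfl
    rw [h4]
    omega

theorem pv_xor_closed (q o : Nat) (ho : 1 ≤ o) : ∀ z : Nat,
    ((2*q+1) * 2^(o+z)) ^^^ ((2*q*2^o + (2^o - 1)) * 2^z) = (2^(o+1) - 1) * 2^z := by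
  intro z
  induction z with
  | zero => simpa using pv_xor_odd q o ho
  | succ z ih =>
    have e1 : (2*q+1) * 2^(o+(z+1)) = 2 * ((2*q+1) * 2^(o+z)) + Bool.toNat false := by
      simp only [Bool.toNat_false, add_zero, pow_succ, ← add_assoc]; ring
    have e2 : (2*q*2^o + (2^o - 1)) * 2^(z+1) = 2 * ((2*q*2^o + (2^o - 1)) * 2^z) + Bool.toNat false := by
      simp only [Bool.toNat_false, add_zero, pow_succ]; ring
    rw [e1, e2, pv_xor_bit, ih]
    simp only [Bool.xor_false, Bool.toNat_false, add_zero, pow_succ]; ring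

theorem pv_lor_low : ∀ (k a b : Nat), a < 2^k → (a ||| b * 2^k) = b * 2^k + a := by
  intro k
  induction k with
  | zero => intro a b h; interval_cases a; simp
  | succ k ih =>
    intro a b h
    have e1 : a = 2 * (a/2) + Bool.toNat (decide (a % 2 = 1)) := by
      rcases Nat.mod_two_eq_zero_or_one a with h2 | h2 <;> simp [h2] <;> omega
    have e2 : b * 2^(k+1) = 2 * (b * 2^k) + Bool.toNat false := by
      simp only [Bool.toNat_false, add_zero, pow_succ]; ring
    have ha2 : a / 2 < 2^k := by
      have : (2:Nat)^(k+1) = 2^k * 2 := by rw [pow_succ]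
      omega
    conv_lhs => rw [e1, e2]
    rw [pv_lor_bit, ih (a/2) b ha2]
    have : b * 2^(k+1) = 2 * (b * 2^k) := by rw [pow_succ]; ring
    rcases Nat.mod_two_eq_zero_or_one a with h2 | h2 <;> simp [h2] <;> omega

-- every positive integer is (2q·2^o + (2^o−1))·2^z with o ≥ 1
theorem pv_decomp : ∀ m : Nat, 1 ≤ m → ∃ q o z : Nat, 1 ≤ o ∧ m = (2*q*2^o + (2^o - 1)) * 2^z := by
  intro m
  induction m using Nat.strong_induction_on with
  | _ m ih =>
    intro hm
    rcases Nat.lt_or_ge m 2 with h2 | h2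
    · have : m = 1 := by omega
      exact ⟨0, 1, 0, by omega, by subst this; norm_num⟩
    rcases Nat.mod_two_eq_zero_or_one m with he | he
    · obtain ⟨q, o, z, ho, hdec⟩ := ih (m/2) (by omega) (by omega)
      refine ⟨q, o, z+1, ho, ?_⟩
      rw [pow_succ]
      have : m = 2 * (m/2) := by omega
      rw [this, hdec]; ring
    · set t := m / 2 with ht
      have hm2 : m = 2*t + 1 := by omega
      obtain ⟨q, o, z, ho, hdec⟩ := ih t (by omega) (by omega)
      rcases Nat.eq_zero_or_pos z with hz | hz
      · subst hz
        refine ⟨q, o+1, 0, by omega, ?_⟩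
        simp only [pow_zero, mul_one, pow_succ] at hdec ⊢
        have h1 : (0:Nat) < 2^o := Nat.two_pow_pos o
        have h3 : 2*q*(2^o*2) = (2*q*2^o)*2 := by ring
        omega
      · have hteven : t % 2 = 0 := by
          have h1 : (0:Nat) < 2^z := Nat.two_pow_pos z
          have : (2:Nat)^z = 2^(z-1) * 2 := by
            conv_lhs => rw [show z = (z-1)+1 by omega, pow_succ]
          rw [hdec, this]
          have h4 : (2*q*2^o + (2^o-1)) * (2^(z-1)*2) = ((2*q*2^o + (2^o-1)) * 2^(z-1)) * 2 := by ring
          rw [h4, Nat.mul_mod_left]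
        refine ⟨t/2, 1, 0, by omega, ?_⟩
        simp only [pow_one, pow_zero, mul_one]
        omega

theorem pv_u_odd (q o : Nat) (ho : 1 ≤ o) : (2*q*2^o + (2^o - 1)) % 2 = 1 := by
  have h2 : (2:Nat)^o = 2^(o-1) * 2 := by
    conv_lhs => rw [show o = (o-1)+1 by omega, pow_succ]
  rw [h2]
  have h3 : 2*q*(2^(o-1)*2) = (q*2^(o-1))*4 := by ring
  have h4 : (0:Nat) < 2^(o-1) := Nat.two_pow_pos (o-1)
  omega

-- B's closed form on the decomposition
theorem pv_alt_closed (q o z : Nat) (ho : 1 ≤ o) :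
    solution_alt (((2*q*2^o + (2^o - 1)) * 2^z : Nat) : Int)
      = ((2*q+1) * 2^(o+z) + (2^(o-1) - 1) : Nat) := by
  have h1 : (0:Nat) < 2^o := Nat.two_pow_pos o
  have h1' : (2:Nat) ≤ 2^o := by
    calc (2:Nat) = 2^1 := rfl
    _ ≤ 2^o := Nat.pow_le_pow_right (by norm_num) ho
  have h1z : (0:Nat) < 2^z := Nat.two_pow_pos z
  set N : Nat := (2*q*2^o + (2^o - 1)) * 2^z with hN
  have hNpos : 0 < N := by
    have : 1 ≤ 2*q*2^o + (2^o - 1) := by omega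
    calc 0 < 1 * 1 := by norm_num
    _ ≤ (2*q*2^o + (2^o - 1)) * 2^z := Nat.mul_le_mul this h1z
  have hu : (2*q*2^o + (2^o - 1)) % 2 = 1 := pv_u_odd q o ho
  have hband : PySem.Int.band (N : Int) (-(N : Int)) = ((2^z : Nat) : Int) := by
    rw [PySem.Int.band.eq_1]
    have c1 : (0:Int) ≤ (N:Int) := by positivity
    have c2 : ¬ (0:Int) ≤ -(N:Int) := by
      simp only [not_le]
      omega
    rw [if_pos c1, if_neg c2]
    have e1 : (-(-(N:Int)) - 1).toNat = N - 1 := by omega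
    have e2 : ((N:Int)).toNat = N := by omega
    rw [e1, e2]
    have hge : 2^z ≤ (2*q*2^o + (2^o - 1)) * 2^z := by
      calc 2^z = 1 * 2^z := by ring
      _ ≤ (2*q*2^o + (2^o - 1)) * 2^z := Nat.mul_le_mul_right _ (by omega)
    rw [pv_land_pred z _ hu]
    congr 1
    omega
  have hnat : N + 2^z = (2*q+1) * 2^(o+z) := by
    rw [hN, pow_add]
    have e0 : (2*q+1) * (2^o * 2^z) = (2*q*2^o + 2^o) * 2^z := by ring
    rw [e0]
    have e1 : (2*q*2^o + (2^o - 1)) * 2^z + 2^z = (2*q*2^o + (2^o - 1) + 1) * 2^z := by ring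
    rw [e1]
    congr 1
    omega
  simp only [solution_alt]
  rw [hband]
  have hr : (N:Int) + ((2^z : Nat) : Int) = (((2*q+1) * 2^(o+z) : Nat) : Int) := by
    rw [← hnat]; push_cast; ring
  rw [hr, PySem.Int.bxor_natCast]
  rw [hN, pv_xor_closed q o ho z]
  rw [← Int.natCast_shiftRight, Nat.shiftRight_eq_div_pow]
  rw [PySem.Int.floordiv_natCast]
  have hdiv : (2^(o+1) - 1) * 2^z / 2^2 / 2^z = 2^(o-1) - 1 := by
    rw [Nat.div_div_eq_div_mul]
    have e2 : (2:Nat)^2 * 2^z = 4 * 2^z := by norm_num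
    rw [e2, show (4:Nat) * 2^z = 2^z * 4 by ring]
    have e3 : (2^(o+1) - 1) * 2^z = 2^z * (2^(o+1)-1) := by ring
    rw [e3, Nat.mul_div_mul_left _ _ h1z]
    have e4 : (2:Nat)^(o+1) = 4 * 2^(o-1) := by
      rw [show o+1 = (o-1)+2 by omega, pow_add]
      ring
    have h5 : (0:Nat) < 2^(o-1) := Nat.two_pow_pos (o-1)
    omega
  rw [hdiv, PySem.Int.bor_natCast]
  have hlow : 2^(o-1) - 1 < 2^(o+z) := by
    have h5 : (2:Nat)^(o-1) ≤ 2^(o+z) := Nat.pow_le_pow_right (by norm_num) (by omega)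
    have h6 : (0:Nat) < 2^(o-1) := Nat.two_pow_pos (o-1)
    omega
  rw [pv_lor_low (o+z) _ (2*q+1) hlow]

-- ---- A-side: the string-scanning loop, characterized structurally ----

-- A's loop body over a single char, with the weight len-1-i carried as a Nat counter
def pvApply (c : Char) (k : Nat) : Int × Bool × Bool × Int → Int × Bool × Bool × Int
  | (one, isOne, move, answer) =>
    if c = '1' then
      if move then (one, true, move, answer + 2 ^ k)
      else (one + 1, true, move, answer)
    else
      if isOne && !move then (one, isOne, true, answer + 2 ^ k + (2 ^ (one - 1).toNat - 1))
      else (one, isOne, move, answer)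

def pvGoA : List Char → Nat → (Int × Bool × Bool × Int) → (Int × Bool × Bool × Int)
  | [], _, st => st
  | c :: cs, k, st => pvGoA cs (k + 1) (pvApply c k st)

theorem pvStep_eq (B : List Char) (j : Nat) (hj : j < B.length) (st : Int × Bool × Bool × Int) :
    solutionStep B (PySem.List.len B) st (j : Int) = pvApply B[j] (B.length - 1 - j) st := by
  obtain ⟨one, isOne, move, answer⟩ := st
  have hg : PySem.List.pyGetD B (j : Int) ' ' = B[j] := by
    rw [PySem.List.pyGetD_natCast, List.getD_eq_getElem?_getD, List.getElem?_eq_getElem hj]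
    rfl
  have hexp : (PySem.List.len B - 1 - (j : Int)).toNat = B.length - 1 - j := by
    rw [PySem.List.len_eq]; omega
  simp only [solutionStep, pvApply, hg, hexp]

theorem pvKey (B : List Char) : ∀ (j : Nat), j ≤ B.length → ∀ (st : Int × Bool × Bool × Int),
    (PySem.List.pyRange ((j : Int) - 1) (-1) (-1)).foldl (solutionStep B (PySem.List.len B)) st
      = pvGoA ((B.take j).reverse) (B.length - j) st := by
  intro j
  induction j with
  | zero =>
    intro _ st
    rw [PySem.List.pyRange_neg_one_eq_nil (by norm_num)]
    simp [pvGoA]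
  | succ j ih =>
    intro hj st
    have hjl : j < B.length := by omega
    have h1 : ((j + 1 : Nat) : Int) - 1 = (j : Nat) := by push_cast; ring
    rw [h1, PySem.List.pyRange_neg_one_cons (by omega)]
    rw [List.foldl_cons, ih (by omega)]
    have h2 : B.take (j+1) = B.take j ++ [B[j]] := by
      rw [List.take_add_one, List.getElem?_eq_getElem hjl]
      rfl
    rw [h2, List.reverse_append]
    simp only [List.reverse_cons, List.reverse_nil, List.nil_append, List.singleton_append]
    conv_rhs => rw [pvGoA]
    have h3 : B.length - (j+1) + 1 = B.length - j := by omega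
    have h4 : B.length - (j+1) = B.length - 1 - j := by omega
    rw [h3, h4, ← pvStep_eq B j hjl st]

def pvRb (m : Nat) : List Char := (Nat.toDigits 2 m).reverse

theorem pvRb_zero : pvRb 0 = ['0'] := by decide
theorem pvRb_one : pvRb 1 = ['1'] := by decide

theorem pvRb_step (m : Nat) (h : 2 ≤ m) :
    pvRb m = (m % 2).digitChar :: pvRb (m / 2) := by
  unfold pvRb
  rw [Nat.toDigits_of_base_le (by norm_num) h, List.reverse_append]
  rfl

theorem pvSolution_eq (n : Int) (hn : 0 ≤ n) :
    solution n = (pvGoA (pvRb n.toNat ++ ['0']) 0 (0, false, false, 0)).2.2.2 := by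
  have hb : PySem.List.slice (PySem.Int.toBinChars0b n) (some 2) = Nat.toDigits 2 n.toNat := by
    rw [PySem.List.slice_from _ (by norm_num : (0:Int) ≤ 2)]
    simp only [PySem.Int.toBinChars0b, if_neg (not_lt.2 hn)]
    rfl
  show (_ : Int × Bool × Bool × Int).2.2.2 = _
  rw [show ((('0' :: PySem.List.slice (PySem.Int.toBinChars0b n) (some 2)) : List Char)) =
      '0' :: Nat.toDigits 2 n.toNat from by rw [hb]]
  have hkey := pvKey ('0' :: Nat.toDigits 2 n.toNat) ('0' :: Nat.toDigits 2 n.toNat).length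
    (le_refl _) (0, false, false, 0)
  rw [List.take_length] at hkey
  have hL : PySem.List.len ('0' :: Nat.toDigits 2 n.toNat) - 1
      = ((('0' :: Nat.toDigits 2 n.toNat).length : Int)) - 1 := by
    rw [PySem.List.len_eq]
  rw [hL, hkey]
  simp [pvRb]

theorem pv_digit0 : Nat.digitChar 0 = '0' := rfl
theorem pv_digit1 : Nat.digitChar 1 = '1' := rfl

-- after the swap has happened (move = true), the loop just adds the remaining bits
theorem pvPM : ∀ m : Nat, ∀ (k : Nat) (one answer : Int) (isOne : Bool),
    (pvGoA (pvRb m ++ ['0']) k (one, isOne, true, answer)).2.2.2 = answer + (m : Int) * 2 ^ k := by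
  intro m
  induction m using Nat.strong_induction_on with
  | _ m ih =>
    intro k one answer isOne
    rcases Nat.lt_or_ge m 2 with h2 | h2
    · interval_cases m
      · rw [pvRb_zero]
        simp [pvGoA, pvApply]
      · rw [pvRb_one]
        simp [pvGoA, pvApply]
    · rw [pvRb_step m h2, List.cons_append, pvGoA]
      rcases Nat.mod_two_eq_zero_or_one m with he | he
      · rw [he]
        have hd : pvApply (Nat.digitChar 0) k (one, isOne, true, answer) = (one, isOne, true, answer) := by
          simp [pvApply, pv_digit0]
        rw [hd, ih (m/2) (by omega)]
        have hm : (m : Int) = 2 * ((m/2 : Nat) : Int) := by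
          have : m = 2 * (m/2) := by omega
          exact_mod_cast congrArg (Nat.cast : Nat → Int) this
        rw [hm, pow_succ]
        ring
      · rw [he]
        have hd : pvApply (Nat.digitChar 1) k (one, isOne, true, answer)
            = (one, true, true, answer + 2 ^ k) := by
          simp [pvApply, pv_digit1]
        rw [hd, ih (m/2) (by omega)]
        have hm : (m : Int) = 2 * ((m/2 : Nat) : Int) + 1 := by
          have : m = 2 * (m/2) + 1 := by omega
          exact_mod_cast congrArg (Nat.cast : Nat → Int) this
        rw [hm, pow_succ]
        ring

-- hitting a '0' after some '1's triggers the swap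
theorem pvPTrig : ∀ (m : Nat) (k : Nat) (one answer : Int), 1 ≤ one → m % 2 = 0 →
    (pvGoA (pvRb m ++ ['0']) k (one, true, false, answer)).2.2.2
      = answer + (m : Int) * 2 ^ k + 2 ^ k + (2 ^ (one - 1).toNat - 1) := by
  intro m k one answer hone he
  rcases Nat.lt_or_ge m 2 with h2 | h2
  · have : m = 0 := by omega
    subst this
    rw [pvRb_zero]
    simp [pvGoA, pvApply]
  · rw [pvRb_step m h2, he, List.cons_append, pvGoA]
    have hd : pvApply (Nat.digitChar 0) k (one, true, false, answer)
        = (one, true, true, answer + 2 ^ k + (2 ^ (one - 1).toNat - 1)) := by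
      simp [pvApply, pv_digit0]
    rw [hd, pvPM (m/2)]
    have hm : (m : Int) = 2 * ((m/2 : Nat) : Int) := by
      have : m = 2 * (m/2) := by omega
      exact_mod_cast congrArg (Nat.cast : Nat → Int) this
    rw [hm, pow_succ]
    ring

-- scanning the odd part 2q·2^o + (2^o−1): o ones, then the triggering '0'
theorem pvPO : ∀ (o : Nat), 1 ≤ o → ∀ (q k : Nat) (one answer : Int) (b : Bool), 0 ≤ one →
    (pvGoA (pvRb (2*q*2^o + (2^o - 1)) ++ ['0']) k (one, b, false, answer)).2.2.2
      = answer + (2*(q:Int)+1) * 2 ^ (k+o) + (2 ^ ((one+o).toNat - 1) - 1) := by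
  intro o ho
  induction o, ho using Nat.le_induction with
  | base =>
    intro q k one answer b hone
    rcases Nat.eq_zero_or_pos q with hq | hq
    · subst hq
      have hm : 2*0*2^1 + (2^1 - 1) = 1 := by norm_num
      rw [hm, pvRb_one]
      simp only [List.cons_append, List.nil_append, pvGoA, pvApply]
      norm_num
      rw [if_neg (by decide : ¬ ('0':Char) = '1'),
        show (one+1).toNat - 1 = one.toNat from by omega]
    · have hm : 2*q*2^1 + (2^1 - 1) = 4*q + 1 := by norm_num; ring
      rw [hm, pvRb_step (4*q+1) (by omega)]
      have h1 : (4*q+1) % 2 = 1 := by omega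
      have h2 : (4*q+1) / 2 = 2*q := by omega
      rw [h1, h2, List.cons_append, pvGoA]
      have hd : pvApply (Nat.digitChar 1) k (one, b, false, answer)
          = (one + 1, true, false, answer) := by
        simp [pvApply, pv_digit1]
      rw [hd, pvPTrig (2*q) (k+1) (one+1) answer (by omega) (by omega)]
      have he1 : (one + 1 - 1).toNat = (one + 1).toNat - 1 := by omega
      have he2 : ((2*q : Nat) : Int) = 2*(q:Int) := by push_cast; ring
      rw [he1, he2, pow_succ]
      ring
  | succ o ho ih =>
    intro q k one answer b hone
    have hp : (0:Nat) < 2^o := Nat.two_pow_pos o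
    have hp2 : (2:Nat) ≤ 2^o := by
      calc (2:Nat) = 2^1 := rfl
      _ ≤ 2^o := Nat.pow_le_pow_right (by norm_num) ho
    have hm2 : 2 ≤ 2*q*2^(o+1) + (2^(o+1) - 1) := by
      have : (2:Nat)^(o+1) = 2^o*2 := by rw [pow_succ]
      omega
    have h1 : (2*q*2^(o+1) + (2^(o+1) - 1)) % 2 = 1 := by
      have e : (2:Nat)^(o+1) = 2^o*2 := by rw [pow_succ]
      rw [e]
      have e2 : 2*q*(2^o*2) = (q*2^o)*4 := by ring
      omega
    have h2 : (2*q*2^(o+1) + (2^(o+1) - 1)) / 2 = 2*q*2^o + (2^o - 1) := by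
      have e : (2:Nat)^(o+1) = 2^o*2 := by rw [pow_succ]
      rw [e]
      have e2 : 2*q*(2^o*2) = (2*q*2^o)*2 := by ring
      omega
    rw [pvRb_step _ hm2, h1, h2, List.cons_append, pvGoA]
    have hd : pvApply (Nat.digitChar 1) k (one, b, false, answer)
        = (one + 1, true, false, answer) := by
      simp [pvApply, pv_digit1]
    rw [hd, ih q (k+1) (one+1) answer true (by omega)]
    have he1 : (one + 1 + ↑o).toNat = (one + (↑o + 1)).toNat := by omega
    have he2 : k + 1 + o = k + (o + 1) := by omega
    rw [he1, he2]
    push_cast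
    ring

-- the z trailing zeros of n only advance the weight counter
theorem pvPZ : ∀ (z u : Nat), u % 2 = 1 → ∀ (k : Nat) (one answer : Int),
    pvGoA (pvRb (u*2^z) ++ ['0']) k (one, false, false, answer)
      = pvGoA (pvRb u ++ ['0']) (k+z) (one, false, false, answer) := by
  intro z
  induction z with
  | zero => intro u hu k one answer; simp
  | succ z ih =>
    intro u hu k one answer
    have hu1 : 1 ≤ u := by omega
    have hp : (0:Nat) < 2^z := Nat.two_pow_pos z
    have h2z : (2:Nat) ≤ 2^(z+1) := by
      calc (2:Nat) = 2^1 := rfl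
      _ ≤ 2^(z+1) := Nat.pow_le_pow_right (by norm_num) (by omega)
    have hm2 : 2 ≤ u * 2^(z+1) := by
      simpa using Nat.mul_le_mul hu1 h2z
    have h1 : u * 2^(z+1) % 2 = 0 := by
      rw [pow_succ, show u * (2^z*2) = (u*2^z)*2 from by ring, Nat.mul_mod_left]
    have h2 : u * 2^(z+1) / 2 = u * 2^z := by
      rw [pow_succ, show u * (2^z*2) = (u*2^z)*2 from by ring]
      omega
    rw [pvRb_step _ hm2, h1, h2, List.cons_append, pvGoA]
    have hd : pvApply (Nat.digitChar 0) k (one, false, false, answer)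
        = (one, false, false, answer) := by
      simp [pvApply, pv_digit0]
    rw [hd, ih u hu (k+1)]
    have : k + 1 + z = k + (z+1) := by omega
    rw [this]

-- ===== VERDICT (by name: the statement is the Claim_ definition above) =====
theorem solution_spec : Claim_equal_solution := by
  unfold Claim_equal_solution
  intro n _ hn
  unfold Pre_solution at hn
  unfold Spec_solution
  have hm : 1 ≤ n.toNat := by omega
  obtain ⟨q, o, z, ho, hdec⟩ := pv_decomp n.toNat hm
  have hn' : n = ((n.toNat : Nat) : Int) := by omega
  rw [hn', hdec]
  rw [pvSolution_eq _ (by positivity), pv_alt_closed q o z ho]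
  rw [Int.toNat_natCast]
  rw [pvPZ z _ (pv_u_odd q o ho) 0]
  rw [pvPO o ho q (0+z) 0 0 false (le_refl 0)]
  have h6 : (1:Nat) ≤ 2^(o-1) := Nat.one_le_two_pow
  have he1 : ((0:Int) + (o:Int)).toNat = o := by omega
  have he2 : 0 + z + o = o + z := by omega
  rw [he1, he2]
  push_cast [Nat.cast_sub h6]
  ring
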